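-- pv_equiv track=rewrite | github.com/Bobur2828/Python_projectlar | So'zlar ichida unli harflar sanogi.py | unli_harflar
-- ===== SOURCE A (Python) =====
-- def unli_harflar(word_list):
--     unli_harflar = ['a', 'e', 'i', 'o', 'u', 'A', 'E', 'I', 'O', 'U']
--     b = {}
--     c=[]  # kod kop bo'lishi mumkin lekin kalta kod bo'lsa unli harflar soni bir hil
--     d=0   # bo'lsa faqatgina bitta sozni olib beryatgandi shunga sal kopaytirvordim
--     x=[]
--     for word in word_list:
--         unli = []
--         for harf in word:
--             if harf in unli_harflar:
--                 unli.append(harf)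
--                 b[word] = len(unli)
--     for key,val in b.items():
--         c.append(val)
--         d=max(c)
--     for key,val in b.items():
--         if val==d:
--             x.append(key)
--     return(f"Eng kop unli harflar ishlatilgan so'z(lar) {x} unli harflar soni {d} ta")
-- ===== SOURCE B (Python) =====
-- def unli_harflar(word_list):
--     counts = []          # (word, vowel_count) for distinct words having at least one vowel, first-occurrence order
--     seen = set()
--     best = 0
--     for word in word_list:
--         if word in seen:
--             continue
--         seen.add(word)
--         n = sum(1 for ch in word if ch in "aeiouAEIOU")
--         if n > 0:
--             counts.append((word, n))
--             if n > best:
--                 best = n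
--     x = [w for w, n in counts if n == best]
--     return f"Eng kop unli harflar ishlatilgan so'z(lar) {x} unli harflar soni {best} ta"
-- ===== Notes on version B (the rewrite author's own statement) =====
-- stated objective: faster
-- what changed: Replaces A's char-by-char dict rebuilding (an insert per vowel) plus three dict passes with max() recomputed from scratch on a growing list, by one pass that counts vowels per distinct word while tracking a running maximum, then one filter.
import Mathlib
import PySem

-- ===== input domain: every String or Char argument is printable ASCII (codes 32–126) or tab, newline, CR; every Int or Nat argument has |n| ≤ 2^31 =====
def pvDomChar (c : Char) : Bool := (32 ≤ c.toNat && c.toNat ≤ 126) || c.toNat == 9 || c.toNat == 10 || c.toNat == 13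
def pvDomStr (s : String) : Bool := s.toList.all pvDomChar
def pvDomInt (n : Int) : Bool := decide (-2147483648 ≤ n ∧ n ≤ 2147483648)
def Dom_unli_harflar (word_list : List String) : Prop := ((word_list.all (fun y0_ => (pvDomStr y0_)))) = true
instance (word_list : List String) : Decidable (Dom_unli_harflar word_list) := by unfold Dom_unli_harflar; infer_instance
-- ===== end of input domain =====

-- B replaces A's per-vowel dict re-insertion and its three dict passes (with max() recomputed
-- over a growing list each iteration) by a single pass with a running maximum; objective: faster.


-- ===== PORT A =====
-- shared: repr() of a str / list of str, as Python's f-string "{x}" renders it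
-- (exact for printable-ASCII strings plus tab/newline/CR, which is all of Dom)
def pvReprChar (q : Char) (c : Char) : List Char :=
  if c = '\\' then ['\\', '\\']
  else if c = q then ['\\', q]
  else if c = '\n' then ['\\', 'n']
  else if c = '\r' then ['\\', 'r']
  else if c = '\t' then ['\\', 't']
  else [c]

def pvReprStr (s : String) : String :=
  let q := if s.toList.contains '\'' && !(s.toList.contains '"') then '"' else '\''
  String.ofList ((q :: s.toList.flatMap (pvReprChar q)) ++ [q])

def pvReprList (xs : List String) : String :=
  "[" ++ String.intercalate ", " (xs.map pvReprStr) ++ "]"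

-- shared: the f-string both Pythons return
def pvFormat (x : List String) (d : Int) : String :=
  "Eng kop unli harflar ishlatilgan so'z(lar) " ++ pvReprList x ++
    " unli harflar soni " ++ PySem.Int.toStr d ++ " ta"

def unli_harflar (word_list : List String) : String :=
  let vowels : List Char := ['a', 'e', 'i', 'o', 'u', 'A', 'E', 'I', 'O', 'U']
  -- for word in word_list: for harf in word: if harf in vowels: unli.append; b[word] = len(unli)
  let b : PySem.Dict String Int :=
    word_list.foldl (fun b word =>
      (word.toList.foldl (fun (st : List Char × PySem.Dict String Int) harf =>
        if vowels.contains harf then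
          let unli := st.1 ++ [harf]
          (unli, st.2.insert word (unli.length : Int))
        else st) (([] : List Char), b)).2) PySem.Dict.empty
  -- for key,val in b.items(): c.append(val); d = max(c)   (c is nonempty at each max(c))
  let cd : List Int × Int :=
    b.items.foldl (fun cd kv =>
      let c := cd.1 ++ [kv.2]
      (c, (PySem.List.max? c (fun y => y)).getD cd.2)) (([] : List Int), 0)
  let d := cd.2
  -- for key,val in b.items(): if val == d: x.append(key)
  let x := b.items.foldl (fun x kv => if kv.2 == d then x ++ [kv.1] else x) ([] : List String)
  pvFormat x d

-- ===== PORT B =====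
def unli_harflar_alt (word_list : List String) : String :=
  let st : List (String × Int) × PySem.Set String × Int :=
    word_list.foldl (fun st word =>
      if PySem.Set.contains st.2.1 word then st
      else
        let seen := PySem.Set.add st.2.1 word
        -- n = sum(1 for ch in word if ch in "aeiouAEIOU")  (a 0/1 generator sum = countP)
        let n : Int := (word.toList.countP (fun ch => "aeiouAEIOU".toList.contains ch) : Int)
        if 0 < n then
          (st.1 ++ [(word, n)], seen, if st.2.2 < n then n else st.2.2)
        else (st.1, seen, st.2.2)) (([] : List (String × Int)), PySem.Set.empty, 0)
  let x := (st.1.filter (fun p => p.2 == st.2.2)).map (fun p => p.1)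
  pvFormat x st.2.2

-- ===== PRECONDITION & SPEC =====
def Spec_unli_harflar (word_list : List String) (out : String) : Prop := out = unli_harflar_alt word_list
instance (word_list : List String) (out : String) : Decidable (Spec_unli_harflar word_list out) := by unfold Spec_unli_harflar; infer_instance

-- ===== CLAIM (what is proved, stated in full; the proofs are below) =====
def Claim_equal_unli_harflar : Prop := ∀ (word_list : List String), Dom_unli_harflar word_list → Spec_unli_harflar word_list (unli_harflar word_list)

-- ===== LEMMAS AND PROOFS =====

def pvIsV (c : Char) : Bool := (['a', 'e', 'i', 'o', 'u', 'A', 'E', 'I', 'O', 'U'] : List Char).contains c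
def pvVc (w : String) : Int := (w.toList.countP pvIsV : Int)
-- the common "(distinct vowel-carrying word, vowel count)" list both programs build
def pvL (ws : List String) : List (String × Int) :=
  (PySem.List.dedup (ws.filter (fun w => w.toList.any pvIsV))).map (fun w => (w, pvVc w))

theorem pv_isV_def (c : Char) : (['a', 'e', 'i', 'o', 'u', 'A', 'E', 'I', 'O', 'U'] : List Char).contains c = pvIsV c := rfl

theorem pv_inner (word : String) (cs : List Char) (u : List Char) (b : PySem.Dict String Int) :
    cs.foldl (fun (st : List Char × PySem.Dict String Int) harf =>
        if (['a', 'e', 'i', 'o', 'u', 'A', 'E', 'I', 'O', 'U'] : List Char).contains harf then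
          let unli := st.1 ++ [harf]
          (unli, st.2.insert word (unli.length : Int))
        else st) (u, b)
      = (u ++ cs.filter pvIsV,
         if cs.any pvIsV then b.insert word ((u.length + cs.countP pvIsV : Nat) : Int) else b) := by
  induction cs generalizing u b with
  | nil => simp
  | cons c cs ih =>
    simp only [pv_isV_def] at ih ⊢
    simp only [List.foldl_cons, List.any_cons, List.countP_cons, List.filter_cons]
    by_cases hc : pvIsV c
    · rw [if_pos hc]
      simp only [ih]
      by_cases ha : cs.any pvIsV
      · simp only [hc, ha, Bool.or_true, if_pos,
          PySem.Dict.insert_insert_self, List.append_assoc, List.singleton_append,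
          List.length_append, List.length_cons, List.length_nil]
        congr 2
        omega
      · simp only [Bool.not_eq_true] at ha
        have h0 : cs.countP pvIsV = 0 :=
          List.countP_eq_zero.mpr (fun a hmem => by simpa using List.any_eq_false.mp ha a hmem)
        simp [hc, ha, h0]
    · simp only [Bool.not_eq_true] at hc
      rw [if_neg (by simp [hc])]
      simp only [ih]
      simp [hc]

theorem pv_keys_pvL (ws : List String) :
    (pvL ws).map (fun p => p.1) = PySem.List.dedup (ws.filter (fun w => w.toList.any pvIsV)) := by
  simp [pvL, List.map_map, Function.comp_def]

theorem pv_dictA (ws : List String) :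
    (ws.foldl (fun b word =>
      (word.toList.foldl (fun (st : List Char × PySem.Dict String Int) harf =>
        if (['a', 'e', 'i', 'o', 'u', 'A', 'E', 'I', 'O', 'U'] : List Char).contains harf then
          let unli := st.1 ++ [harf]
          (unli, st.2.insert word (unli.length : Int))
        else st) (([] : List Char), b)).2) PySem.Dict.empty).items = pvL ws := by
  induction ws using List.reverseRecOn with
  | nil => rfl
  | append_singleton ws w ih =>
    rw [List.foldl_append, List.foldl_cons, List.foldl_nil, pv_inner]
    by_cases hv : w.toList.any pvIsV
    · rw [if_pos hv]
      have hkeys : (ws.foldl (fun b word =>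
          (word.toList.foldl (fun (st : List Char × PySem.Dict String Int) harf =>
            if (['a', 'e', 'i', 'o', 'u', 'A', 'E', 'I', 'O', 'U'] : List Char).contains harf then
              let unli := st.1 ++ [harf]
              (unli, st.2.insert word (unli.length : Int))
            else st) (([] : List Char), b)).2) PySem.Dict.empty).keys
          = PySem.List.dedup (ws.filter (fun w => w.toList.any pvIsV)) := by
        rw [show ∀ (d : PySem.Dict String Int), d.keys = d.items.map (fun p => p.1) from fun _ => rfl, ih, pv_keys_pvL]
      have hfil : (ws ++ [w]).filter (fun w => w.toList.any pvIsV)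
          = ws.filter (fun w => w.toList.any pvIsV) ++ [w] := by
        rw [List.filter_append]; simp [hv]
      by_cases hmem : w ∈ ws.filter (fun w => w.toList.any pvIsV)
      · have hc : (ws.foldl (fun b word =>
            (word.toList.foldl (fun (st : List Char × PySem.Dict String Int) harf =>
              if (['a', 'e', 'i', 'o', 'u', 'A', 'E', 'I', 'O', 'U'] : List Char).contains harf then
                let unli := st.1 ++ [harf]
                (unli, st.2.insert word (unli.length : Int))
              else st) (([] : List Char), b)).2) PySem.Dict.empty).contains w = true := by
          rw [PySem.Dict.contains_iff_mem_keys, hkeys, PySem.List.dedup_eq_ofList, PySem.Set.mem_ofList]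
          exact hmem
        rw [PySem.Dict.items_insert_of_contains _ _ hc, ih]
        have hded : PySem.List.dedup ((ws ++ [w]).filter (fun w => w.toList.any pvIsV))
            = PySem.List.dedup (ws.filter (fun w => w.toList.any pvIsV)) := by
          rw [hfil, PySem.List.dedup_eq_ofList, PySem.List.dedup_eq_ofList,
            PySem.Set.ofList_eq_foldl, List.foldl_append, ← PySem.Set.ofList_eq_foldl]
          simp only [List.foldl_cons, List.foldl_nil]
          simp [PySem.Set.add, PySem.Set.mem_ofList, hmem]
        simp only [pvL]
        rw [hded, List.map_map]
        apply List.map_congr_left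
        intro k hk
        by_cases hkw : k = w
        · simp [hkw, pvVc]
        · simp [hkw]
      · have hc : (ws.foldl (fun b word =>
            (word.toList.foldl (fun (st : List Char × PySem.Dict String Int) harf =>
              if (['a', 'e', 'i', 'o', 'u', 'A', 'E', 'I', 'O', 'U'] : List Char).contains harf then
                let unli := st.1 ++ [harf]
                (unli, st.2.insert word (unli.length : Int))
              else st) (([] : List Char), b)).2) PySem.Dict.empty).contains w = false := by
          rw [Bool.eq_false_iff, Ne, PySem.Dict.contains_iff_mem_keys, hkeys,
            PySem.List.dedup_eq_ofList, PySem.Set.mem_ofList]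
          exact hmem
        rw [PySem.Dict.items_insert_of_not_contains _ _ hc, ih]
        have hded : PySem.List.dedup ((ws ++ [w]).filter (fun w => w.toList.any pvIsV))
            = PySem.List.dedup (ws.filter (fun w => w.toList.any pvIsV)) ++ [w] := by
          rw [hfil, PySem.List.dedup_eq_ofList, PySem.List.dedup_eq_ofList,
            PySem.Set.ofList_eq_foldl, List.foldl_append, ← PySem.Set.ofList_eq_foldl]
          simp only [List.foldl_cons, List.foldl_nil]
          simp [PySem.Set.add, PySem.Set.mem_ofList, hmem]
        simp only [pvL]
        rw [hded, List.map_append]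
        simp [pvVc]
    · rw [if_neg hv, ih]
      have : (ws ++ [w]).filter (fun w => w.toList.any pvIsV) = ws.filter (fun w => w.toList.any pvIsV) := by
        rw [List.filter_append]; simp [hv]
      simp only [pvL]
      rw [this]

theorem pv_second (ps : List (String × Int)) (acc : List Int) (d0 : Int) :
    ps.foldl (fun cd kv =>
        let c := cd.1 ++ [kv.2]
        (c, (PySem.List.max? c (fun y => y)).getD cd.2)) (acc, d0)
      = (acc ++ ps.map (fun p => p.2),
         if ps = [] then d0 else (PySem.List.max? (acc ++ ps.map (fun p => p.2)) (fun y => y)).getD 0) := by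
  induction ps generalizing acc d0 with
  | nil => simp
  | cons kv ps ih =>
    simp only [List.foldl_cons, ih, List.map_cons]
    have hne : acc ++ [kv.2] ≠ [] := by simp
    obtain ⟨m, hm⟩ : ∃ m, PySem.List.max? (acc ++ [kv.2]) (fun y => y) = some m := by
      cases h : PySem.List.max? (acc ++ [kv.2]) (fun y => y) with
      | none => exact absurd ((PySem.List.max?_eq_none_iff _ _).mp h) hne
      | some m => exact ⟨m, rfl⟩
    by_cases hp : ps = []
    · subst hp
      simp [hm]
    · simp only [hp, if_false]
      rw [if_neg (by simp)]
      simp [List.append_assoc]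

theorem pv_altLoop (ws : List String) :
    ws.foldl (fun st word =>
      if PySem.Set.contains st.2.1 word then st
      else
        let seen := PySem.Set.add st.2.1 word
        let n : Int := (word.toList.countP (fun ch => "aeiouAEIOU".toList.contains ch) : Int)
        if 0 < n then
          (st.1 ++ [(word, n)], seen, if st.2.2 < n then n else st.2.2)
        else (st.1, seen, st.2.2)) (([] : List (String × Int)), PySem.Set.empty, 0)
      = (pvL ws, PySem.Set.ofList ws, (pvL ws).foldl (fun a p => max a p.2) 0) := by
  have hpred : (fun ch => "aeiouAEIOU".toList.contains ch) = pvIsV := by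
    funext c; rw [show "aeiouAEIOU".toList = (['a','e','i','o','u','A','E','I','O','U'] : List Char) by decide]; rfl
  induction ws using List.reverseRecOn with
  | nil => rfl
  | append_singleton ws w ih =>
    rw [List.foldl_append, List.foldl_cons, List.foldl_nil, ih]
    have hofl : PySem.Set.ofList (ws ++ [w]) = PySem.Set.add (PySem.Set.ofList ws) w := by
      rw [PySem.Set.ofList_eq_foldl, List.foldl_append, ← PySem.Set.ofList_eq_foldl]
      simp
    by_cases hmem : w ∈ ws
    · have hct : PySem.Set.contains (PySem.Set.ofList ws) w = true := by
        rw [PySem.Set.contains_iff, PySem.Set.mem_ofList]; exact hmem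
      rw [if_pos hct]
      have hL : pvL (ws ++ [w]) = pvL ws := by
        simp only [pvL, List.filter_append]
        by_cases hv : w.toList.any pvIsV
        · have : w ∈ ws.filter (fun w => w.toList.any pvIsV) := List.mem_filter.mpr ⟨hmem, hv⟩
          rw [PySem.List.dedup_eq_ofList, PySem.List.dedup_eq_ofList, PySem.Set.ofList_eq_foldl,
            List.foldl_append, ← PySem.Set.ofList_eq_foldl]
          simp [hv, PySem.Set.add, PySem.Set.mem_ofList, this]
        · simp only [Bool.not_eq_true] at hv
          simp [hv]
      have hS : PySem.Set.ofList (ws ++ [w]) = PySem.Set.ofList ws := by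
        rw [hofl]; simp [PySem.Set.add, PySem.Set.mem_ofList, hmem]
      rw [hL, hS]
    · have hct : PySem.Set.contains (PySem.Set.ofList ws) w = false := by
        rw [Bool.eq_false_iff, Ne, PySem.Set.contains_iff, PySem.Set.mem_ofList]; exact hmem
      rw [if_neg (by simp [PySem.Set.mem_ofList, hmem])]
      simp only [hpred]
      by_cases hv : w.toList.any pvIsV
      · have hpos : (0 : Int) < (w.toList.countP pvIsV : Int) := by
          obtain ⟨c, hcmem, hcv⟩ := List.any_eq_true.mp hv
          have : 0 < w.toList.countP pvIsV := List.countP_pos_iff.mpr ⟨c, hcmem, hcv⟩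
          exact_mod_cast this
        rw [if_pos hpos]
        have hL : pvL (ws ++ [w]) = pvL ws ++ [(w, pvVc w)] := by
          simp only [pvL, List.filter_append]
          simp only [List.filter_cons, List.filter_nil, hv, if_true]
          have hnm : w ∉ ws.filter (fun w => w.toList.any pvIsV) := fun h => hmem (List.mem_filter.mp h).1
          rw [PySem.List.dedup_eq_ofList, PySem.List.dedup_eq_ofList, PySem.Set.ofList_eq_foldl,
            List.foldl_append, ← PySem.Set.ofList_eq_foldl]
          simp [PySem.Set.add, PySem.Set.mem_ofList, hnm]
        rw [hL, hofl]
        simp only [Prod.mk.injEq, true_and]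
        rw [List.foldl_append]
        simp only [List.foldl_cons, List.foldl_nil]
        have : ∀ a n : Int, (if a < n then n else a) = max a n := by
          intro a n; by_cases h : a < n <;> simp [h, max_def] <;> omega
        rw [this]
        exact ⟨rfl, rfl⟩
      · simp only [Bool.not_eq_true] at hv
        have h0 : w.toList.countP pvIsV = 0 :=
          List.countP_eq_zero.mpr (fun a hmem' => by simpa using List.any_eq_false.mp hv a hmem')
        rw [if_neg (by simp [h0])]
        have hL : pvL (ws ++ [w]) = pvL ws := by
          simp only [pvL, List.filter_append]
          simp [hv]
        rw [hL, hofl]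

theorem pv_max_eq (l : List (String × Int)) (h : ∀ p ∈ l, 0 ≤ p.2) :
    (if l = [] then (0 : Int) else (PySem.List.max? (l.map (fun p => p.2)) (fun y => y)).getD 0)
      = l.foldl (fun a p => max a p.2) 0 := by
  cases l with
  | nil => simp
  | cons p t =>
    rw [if_neg (by simp)]
    simp only [List.map_cons, PySem.List.max?_id_cons, Option.getD_some]
    have h2 : (0 : Int) ≤ p.2 := h p (by simp)
    calc (t.map (fun p => p.2)).foldl max p.2
        = (t.map (fun p => p.2)).foldl max (max 0 p.2) := by rw [max_eq_right h2]
      _ = (p :: t).foldl (fun a p => max a p.2) 0 := by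
          simp only [List.foldl_cons, List.foldl_map]

-- ===== VERDICT (by name: the statement is the Claim_ definition above) =====
theorem unli_harflar_spec : Claim_equal_unli_harflar := by
  intro ws _
  unfold Spec_unli_harflar
  simp only [unli_harflar, unli_harflar_alt]
  rw [pv_dictA, pv_altLoop, pv_second]
  simp only [List.nil_append]
  rw [pv_max_eq _ (by
    intro p hp
    simp only [pvL, List.mem_map] at hp
    obtain ⟨w, _, rfl⟩ := hp
    simp [pvVc])]
  rw [PySem.List.foldl_append_if]
  simp
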